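-- pv_equiv track=rewrite | github.com/AdamZhouSE/pythonHomework | Code/CodeRecords/2356/61053/260816.py | find_v
-- ===== SOURCE A (Python) =====
-- def find_v(numlst):
--     record = []
--     maxval = numlst[0]
--     for i in range(0,len(numlst)):
--         if numlst[i] > maxval:
--             maxval = numlst[i]
--         lst = [maxval]
--         record.append(lst)
--
--     minval = numlst[len(numlst)-1]
--     for i in range(len(numlst)-1,-1,-1):
--         if numlst[i] < minval:
--             minval = numlst[i]
--         record[i].append(minval)
--
--     for i in range(1,len(numlst)-1):
--         if numlst[i] >= record[i][0] and numlst[i] <= record[i][1]: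
--             return numlst[i]
--     return -1
-- ===== SOURCE B (Python) =====
-- def find_v(numlst):
--     # brute force straight from the definition: the element must dominate everything
--     # before it and be dominated by everything after it
--     for i in range(1, len(numlst) - 1):
--         v = numlst[i]
--         if all(x <= v for x in numlst[:i]) and all(v <= x for x in numlst[i:]):
--             return v
--     return -1
-- ===== Notes on version B (the rewrite author's own statement) =====
-- stated objective: simpler
-- what changed: Replaces A's three staged passes building a list-of-lists record of [prefix_max, suffix_min] pairs by a direct brute-force scan that checks each interior element against its whole prefix and suffix slices.
import Mathlib
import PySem

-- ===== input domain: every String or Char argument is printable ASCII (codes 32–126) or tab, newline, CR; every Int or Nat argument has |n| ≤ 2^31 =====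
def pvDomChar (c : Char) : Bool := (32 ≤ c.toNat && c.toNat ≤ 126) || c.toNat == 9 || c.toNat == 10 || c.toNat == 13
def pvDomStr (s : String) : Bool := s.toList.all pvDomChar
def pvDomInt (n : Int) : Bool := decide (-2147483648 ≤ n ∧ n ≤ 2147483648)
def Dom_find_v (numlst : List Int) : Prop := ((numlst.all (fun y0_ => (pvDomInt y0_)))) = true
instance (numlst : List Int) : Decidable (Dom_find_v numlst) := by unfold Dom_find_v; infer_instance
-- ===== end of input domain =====

-- B drops A's three staged passes and its list-of-lists record of [prefix_max, suffix_min] pairs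
-- in favour of a direct brute-force scan checking each interior element against its whole prefix
-- and suffix slices (objective: simpler; O(n^2) instead of A's O(n)).

-- ===== PORT A =====
-- A's third loop with its early return ('return numlst[i]' / final 'return -1')
def findLoopA (numlst : List Int) (record : List (List Int)) : List Int → Int
  | [] => -1
  | i :: rest =>
      if PySem.List.pyGetD numlst i 0 ≥ PySem.List.pyGetD (PySem.List.pyGetD record i []) 0 0
          ∧ PySem.List.pyGetD numlst i 0 ≤ PySem.List.pyGetD (PySem.List.pyGetD record i []) 1 0
      then PySem.List.pyGetD numlst i 0
      else findLoopA numlst record rest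

def find_v (numlst : List Int) : Int :=
  let n : Int := numlst.length
  -- first loop: record.append([maxval])
  let st1 := (PySem.List.pyRange 0 n 1).foldl
      (fun (st : List (List Int) × Int) i =>
        let maxval := if PySem.List.pyGetD numlst i 0 > st.2 then PySem.List.pyGetD numlst i 0 else st.2
        (st.1 ++ [[maxval]], maxval))
      ([], PySem.List.pyGetD numlst 0 0)
  -- second loop: record[i].append(minval), i descending
  let st2 := (PySem.List.pyRange (n - 1) (-1) (-1)).foldl
      (fun (st : List (List Int) × Int) i =>
        let minval := if PySem.List.pyGetD numlst i 0 < st.2 then PySem.List.pyGetD numlst i 0 else st.2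
        (st.1.set i.toNat (PySem.List.pyGetD st.1 i [] ++ [minval]), minval))
      (st1.1, PySem.List.pyGetD numlst (n - 1) 0)
  findLoopA numlst st2.1 (PySem.List.pyRange 1 (n - 1) 1)

-- ===== PORT B =====
-- Source B's loop over range(1, len-1) with its early return; the two 'all(...)' checks over the
-- slices numlst[:i] and numlst[i:]
def bLoop (numlst : List Int) : List Int → Int
  | [] => -1
  | i :: rest =>
      let v := PySem.List.pyGetD numlst i 0
      if (PySem.List.slice numlst none (some i)).all (fun x => decide (x ≤ v))
          && (PySem.List.slice numlst (some i) none).all (fun x => decide (v ≤ x))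
      then v
      else bLoop numlst rest

def find_v_alt (numlst : List Int) : Int :=
  bLoop numlst (PySem.List.pyRange 1 ((numlst.length : Int) - 1) 1)

-- ===== PRECONDITION & SPEC =====
-- Pre_ excludes only the empty list, on which A raises IndexError (numlst[0]).
def Pre_find_v (numlst : List Int) : Prop := numlst ≠ []
instance (numlst : List Int) : Decidable (Pre_find_v numlst) := by unfold Pre_find_v; infer_instance
def pvWitness_find_v : List Int := [3, 1, 4, 1, 5]

def Spec_find_v (numlst : List Int) (out : Int) : Prop := out = find_v_alt numlst
instance (numlst : List Int) (out : Int) : Decidable (Spec_find_v numlst out) := by unfold Spec_find_v; infer_instance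

-- ===== CLAIM (what is proved, stated in full; the proofs are below) =====
def Claim_equal_find_v : Prop := ∀ (numlst : List Int), Dom_find_v numlst → Pre_find_v numlst → Spec_find_v numlst (find_v numlst)

-- ===== LEMMAS AND PROOFS =====

-- running prefix maxima of a list, starting from m
def pmaxes (m : Int) : List Int → List Int
  | [] => []
  | x :: t => (if x > m then x else m) :: pmaxes (if x > m then x else m) t

-- final value of the running maximum
def plast (m : Int) : List Int → Int
  | [] => m
  | x :: t => plast (if x > m then x else m) t

-- suffix minima of xs, seeded with m at the right end
def minsDown (m : Int) : List Int → List Int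
  | [] => []
  | x :: t =>
      (if x < (minsDown m t).headD m then x else (minsDown m t).headD m) :: minsDown m t

-- first index in l satisfying A's test (P = prefix maxima, S = suffix minima), else d
def firstQ (xs P S : List Int) : List Int → Int → Int
  | [], d => d
  | i :: r, d =>
      if PySem.List.pyGetD xs i 0 ≥ PySem.List.pyGetD P i 0
          ∧ PySem.List.pyGetD xs i 0 ≤ PySem.List.pyGetD S i 0
      then PySem.List.pyGetD xs i 0 else firstQ xs P S r d

theorem length_pmaxes (m : Int) (xs : List Int) : (pmaxes m xs).length = xs.length := by
  induction xs generalizing m with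
  | nil => rfl
  | cons x t ih => simp [pmaxes, ih]

theorem length_minsDown (m : Int) (xs : List Int) : (minsDown m xs).length = xs.length := by
  induction xs with
  | nil => rfl
  | cons x t ih => simp [minsDown, ih]

theorem pmaxes_snoc (m : Int) (ys : List Int) (x : Int) :
    pmaxes m (ys ++ [x]) = pmaxes m ys ++ [if x > plast m ys then x else plast m ys] := by
  induction ys generalizing m with
  | nil => simp [pmaxes, plast]
  | cons y t ih => simp [pmaxes, plast, ih]

theorem plast_snoc (m : Int) (ys : List Int) (x : Int) :
    plast m (ys ++ [x]) = if x > plast m ys then x else plast m ys := by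
  induction ys generalizing m with
  | nil => simp [plast]
  | cons y t ih => simp [plast, ih]

theorem headD_snoc {α : Type} (l : List α) (a : α) (d : α) :
    (l ++ [a]).headD d = l.headD a := by
  cases l <;> rfl

theorem minsDown_snoc (m : Int) (ys : List Int) (x : Int) :
    minsDown m (ys ++ [x])
      = minsDown (if x < m then x else m) ys ++ [if x < m then x else m] := by
  induction ys with
  | nil => simp [minsDown]
  | cons y t ih => simp [minsDown, ih]

-- ----- loop 1 (A) -----
theorem loop1A (xs : List Int) (k : Nat) (hk : k ≤ xs.length) :
    ∀ (acc : List (List Int)) (m : Int),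
    (PySem.List.pyRange 0 (k : Int) 1).foldl
      (fun (st : List (List Int) × Int) i =>
        let maxval := if PySem.List.pyGetD xs i 0 > st.2 then PySem.List.pyGetD xs i 0 else st.2
        (st.1 ++ [[maxval]], maxval)) (acc, m)
    = (acc ++ (pmaxes m (xs.take k)).map (fun v => [v]), plast m (xs.take k)) := by
  induction k with
  | zero =>
      intro acc m
      rw [PySem.List.pyRange_one_eq_nil (by norm_num)]
      simp [pmaxes, plast]
  | succ k ih =>
      intro acc m
      have hk' : k ≤ xs.length := Nat.le_of_succ_le hk
      have hkx : k < xs.length := hk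
      rw [show ((k + 1 : Nat) : Int) = (k : Int) + 1 by push_cast; ring,
          PySem.List.pyRange_one_succ_right (by positivity), List.foldl_append]
      rw [ih hk']
      have hx : PySem.List.pyGetD xs (k : Int) 0 = xs[k] := by
        rw [PySem.List.pyGetD_eq_getElem xs 0 (by positivity) (by exact_mod_cast hkx)]
        simp
      have htk : xs.take (k + 1) = xs.take k ++ [xs[k]] := by
        rw [← List.take_concat_get hkx]; simp
      simp only [List.foldl_cons, List.foldl_nil, hx, htk, pmaxes_snoc, plast_snoc]
      simp [List.append_assoc]

-- ----- loop 2 (A) -----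
theorem loop2A (xs : List Int) : ∀ (k : Nat), k ≤ xs.length →
    ∀ (rec : List (List Int)) (m : Int), k ≤ rec.length →
    (PySem.List.pyRange ((k : Int) - 1) (-1) (-1)).foldl
      (fun (st : List (List Int) × Int) i =>
        let minval := if PySem.List.pyGetD xs i 0 < st.2 then PySem.List.pyGetD xs i 0 else st.2
        (st.1.set i.toNat (PySem.List.pyGetD st.1 i [] ++ [minval]), minval)) (rec, m)
    = (List.zipWith (fun row v => row ++ [v]) (rec.take k) (minsDown m (xs.take k)) ++ rec.drop k,
       (minsDown m (xs.take k)).headD m) := by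
  intro k
  induction k with
  | zero =>
      intro _ rec m _
      rw [show ((0 : Nat) : Int) - 1 = (-1 : Int) by norm_num,
          PySem.List.pyRange_neg_one_eq_nil (by norm_num)]
      simp [minsDown]
  | succ k ih =>
      intro hk rec m hrec
      have hkx : k < xs.length := hk
      have hkr : k < rec.length := hrec
      rw [show ((k + 1 : Nat) : Int) - 1 = (k : Int) by push_cast; ring,
          PySem.List.pyRange_neg_one_cons (by omega)]
      simp only [List.foldl_cons]
      show List.foldl _
        (rec.set ((k : Int)).toNat
          (PySem.List.pyGetD rec (k : Int) []
            ++ [if PySem.List.pyGetD xs (k : Int) 0 < m then PySem.List.pyGetD xs (k : Int) 0 else m]),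
         if PySem.List.pyGetD xs (k : Int) 0 < m then PySem.List.pyGetD xs (k : Int) 0 else m) _ = _
      have hx : PySem.List.pyGetD xs (k : Int) 0 = xs[k] := by
        rw [PySem.List.pyGetD_eq_getElem xs 0 (by positivity) (by exact_mod_cast hkx)]; simp
      have hrk : PySem.List.pyGetD rec (k : Int) [] = rec[k] := by
        rw [PySem.List.pyGetD_eq_getElem rec [] (by positivity) (by exact_mod_cast hkr)]; simp
      rw [hx, hrk, Int.toNat_natCast]
      rw [ih (le_of_lt hkx) (rec.set k (rec[k] ++ [if xs[k] < m then xs[k] else m]))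
            (if xs[k] < m then xs[k] else m) (by simp; omega)]
      have htk : xs.take (k + 1) = xs.take k ++ [xs[k]] := by
        rw [← List.take_concat_get hkx]; simp
      have htr : rec.take (k + 1) = rec.take k ++ [rec[k]] := by
        rw [← List.take_concat_get hkr]; simp
      have hset_take : (rec.set k (rec[k] ++ [if xs[k] < m then xs[k] else m])).take k = rec.take k := by
        rw [List.take_set, List.set_eq_of_length_le (by simp)]
      have hset_drop : (rec.set k (rec[k] ++ [if xs[k] < m then xs[k] else m])).drop k
          = (rec[k] ++ [if xs[k] < m then xs[k] else m]) :: rec.drop (k + 1) := by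
        rw [List.drop_set, if_neg (lt_irrefl k), Nat.sub_self]
        conv_lhs => rw [List.drop_eq_getElem_cons hkr]
        rfl
      rw [hset_take, hset_drop, htk, htr, minsDown_snoc, headD_snoc,
          List.zipWith_append (by simp [length_minsDown]; omega)]
      simp

-- ----- loop 3 (A) -----
theorem loop3A (xs P S : List Int) (hP : P.length = xs.length) (hS : S.length = xs.length)
    (l : List Int) (hl : ∀ i ∈ l, 0 ≤ i ∧ i < (xs.length : Int)) :
    findLoopA xs (List.zipWith (fun p s => [p, s]) P S) l = firstQ xs P S l (-1) := by
  induction l with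
  | nil => rfl
  | cons i r ih =>
      have hi := hl i (by simp)
      have hrec : PySem.List.pyGetD (List.zipWith (fun p s => [p, s]) P S) i []
          = [PySem.List.pyGetD P i 0, PySem.List.pyGetD S i 0] := by
        rw [PySem.List.pyGetD_eq_getElem _ _ hi.1 (by simp [hP, hS]; omega),
            PySem.List.pyGetD_eq_getElem _ _ hi.1 (by rw [hP]; exact_mod_cast hi.2),
            PySem.List.pyGetD_eq_getElem _ _ hi.1 (by rw [hS]; exact_mod_cast hi.2)]
        simp
      simp only [findLoopA, firstQ, hrec]
      rw [ih (fun j hj => hl j (by simp [hj]))]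
      rfl

-- A computes firstQ over the prefix-max / suffix-min tables
theorem find_v_eq (xs : List Int) :
    find_v xs = firstQ xs (pmaxes (PySem.List.pyGetD xs 0 0) xs)
      (minsDown (PySem.List.pyGetD xs ((xs.length : Int) - 1) 0) xs)
      (PySem.List.pyRange 1 ((xs.length : Int) - 1) 1) (-1) := by
  simp only [find_v]
  rw [loop1A xs xs.length le_rfl]
  simp only [List.take_length, List.nil_append]
  rw [loop2A xs xs.length le_rfl _ _ (by simp [length_pmaxes])]
  rw [List.take_of_length_le (by simp [length_pmaxes]),
      List.drop_eq_nil_of_le (by simp [length_pmaxes]), List.append_nil]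
  rw [List.zipWith_map_left]
  simp only [List.take_length]
  exact loop3A xs _ _ (length_pmaxes _ _) (length_minsDown _ _)
    (PySem.List.pyRange 1 ((xs.length : Int) - 1) 1) (fun i hi => by
    have := PySem.List.mem_pyRange_one.mp hi
    exact ⟨by omega, by omega⟩)

-- ----- B-side characterisations -----

-- element k of the prefix-max table is the running max of the first k+1 elements
theorem pmaxes_getD (m : Int) (xs : List Int) (k : Nat) (hk : k < xs.length) :
    (pmaxes m xs).getD k 0
      = (xs.take (k + 1)).foldl (fun a x => if x > a then x else a) m := by
  induction xs generalizing m k with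
  | nil => simp at hk
  | cons x t ih =>
      cases k with
      | zero => simp [pmaxes]
      | succ k => simpa [pmaxes] using ih (if x > m then x else m) k (by simpa using hk)

theorem minsDown_headD (m : Int) (xs : List Int) :
    (minsDown m xs).headD m = xs.foldr (fun x a => if x < a then x else a) m := by
  induction xs with
  | nil => rfl
  | cons x t ih => simp only [minsDown, List.headD_cons, ih, List.foldr_cons]

-- element k of the suffix-min table is the running min of the elements from k on
theorem minsDown_getD (m : Int) (xs : List Int) (k : Nat) (hk : k < xs.length) :
    (minsDown m xs).getD k 0
      = (xs.drop k).foldr (fun x a => if x < a then x else a) m := by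
  induction xs generalizing k with
  | nil => simp at hk
  | cons x t ih =>
      cases k with
      | zero =>
          simp only [minsDown, List.getD_cons_zero, List.drop_zero, List.foldr_cons,
            minsDown_headD]
      | succ k => simpa [minsDown] using ih k (by simpa using hk)

theorem ge_foldl_max (v m : Int) (l : List Int) :
    l.foldl (fun a x => if x > a then x else a) m ≤ v ↔ m ≤ v ∧ ∀ x ∈ l, x ≤ v := by
  induction l generalizing m with
  | nil => simp
  | cons x t ih =>
      simp only [List.foldl_cons, ih, List.mem_cons]
      constructor
      · rintro ⟨h1, h2⟩
        split_ifs at h1 with h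
        · exact ⟨by omega, fun y hy => by rcases hy with rfl | hy; omega; exact h2 y hy⟩
        · exact ⟨h1, fun y hy => by rcases hy with rfl | hy; omega; exact h2 y hy⟩
      · rintro ⟨h1, h2⟩
        have hx := h2 x (Or.inl rfl)
        exact ⟨by split_ifs <;> omega, fun y hy => h2 y (Or.inr hy)⟩

theorem le_foldr_min (v m : Int) (l : List Int) :
    v ≤ l.foldr (fun x a => if x < a then x else a) m ↔ v ≤ m ∧ ∀ x ∈ l, v ≤ x := by
  induction l with
  | nil => simp
  | cons x t ih =>
      simp only [List.foldr_cons, List.mem_cons]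
      constructor
      · intro h1
        split_ifs at h1 with h
        · have := ih.mp (by omega)
          exact ⟨this.1, fun y hy => by rcases hy with rfl | hy; omega; exact this.2 y hy⟩
        · have := ih.mp h1
          exact ⟨this.1, fun y hy => by rcases hy with rfl | hy; omega; exact this.2 y hy⟩
      · rintro ⟨h1, h2⟩
        have ht := ih.mpr ⟨h1, fun y hy => h2 y (Or.inr hy)⟩
        have hx := h2 x (Or.inl rfl)
        split_ifs <;> omega

-- A's table test at interior index k says exactly what B's two slice checks say
theorem cond_iff (xs : List Int) (hne : xs ≠ []) (k : Nat) (hk : k < xs.length) :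
    (PySem.List.pyGetD xs (k : Int) 0
        ≥ PySem.List.pyGetD (pmaxes (PySem.List.pyGetD xs 0 0) xs) (k : Int) 0
      ∧ PySem.List.pyGetD xs (k : Int) 0
        ≤ PySem.List.pyGetD (minsDown (PySem.List.pyGetD xs ((xs.length : Int) - 1) 0) xs) (k : Int) 0)
      ↔ ((∀ x ∈ xs.take k, x ≤ xs[k]) ∧ (∀ x ∈ xs.drop k, xs[k] ≤ x)) := by
  have hlen : 0 < xs.length := List.length_pos_of_ne_nil hne
  have hxk : PySem.List.pyGetD xs (k : Int) 0 = xs[k] := by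
    rw [PySem.List.pyGetD_eq_getElem xs 0 (by positivity) (by exact_mod_cast hk)]; simp
  have hx0 : PySem.List.pyGetD xs 0 0 = xs[0] := by
    rw [PySem.List.pyGetD_eq_getElem xs 0 (by norm_num) (by exact_mod_cast hlen)]; simp
  have hxl : PySem.List.pyGetD xs ((xs.length : Int) - 1) 0 = xs[xs.length - 1] := by
    rw [show ((xs.length : Int) - 1) = ((xs.length - 1 : Nat) : Int) by omega,
        PySem.List.pyGetD_eq_getElem xs 0 (by positivity) (by exact_mod_cast (by omega : xs.length - 1 < xs.length))]
    simp
  have hP : PySem.List.pyGetD (pmaxes (PySem.List.pyGetD xs 0 0) xs) (k : Int) 0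
      = (xs.take (k + 1)).foldl (fun a x => if x > a then x else a) xs[0] := by
    rw [PySem.List.pyGetD_natCast, hx0, pmaxes_getD xs[0] xs k hk]
  have hS : PySem.List.pyGetD (minsDown (PySem.List.pyGetD xs ((xs.length : Int) - 1) 0) xs) (k : Int) 0
      = (xs.drop k).foldr (fun x a => if x < a then x else a) xs[xs.length - 1] := by
    rw [PySem.List.pyGetD_natCast, hxl, minsDown_getD xs[xs.length - 1] xs k hk]
  have htk : xs.take (k + 1) = xs.take k ++ [xs[k]] := by
    rw [← List.take_concat_get hk]; simp
  have h0mem : xs[0] ∈ xs.take (k + 1) := by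
    have h1 : 0 < (xs.take (k + 1)).length := by simp; omega
    have : (xs.take (k + 1))[0]'h1 = xs[0] := by
      rw [List.getElem_take]
    exact this ▸ List.getElem_mem h1
  have hlmem : xs[xs.length - 1] ∈ xs.drop k := by
    have h1 : xs.length - 1 - k < (xs.drop k).length := by simp; omega
    have : (xs.drop k)[xs.length - 1 - k]'h1 = xs[xs.length - 1] := by
      rw [List.getElem_drop]
      congr 1; omega
    exact this ▸ List.getElem_mem h1
  rw [hxk, hP, hS, ge_iff_le, ge_foldl_max, le_foldr_min]
  constructor
  · rintro ⟨⟨_, hpre⟩, ⟨_, hsuf⟩⟩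
    exact ⟨fun x hx => hpre x (htk ▸ List.mem_append_left _ hx), hsuf⟩
  · rintro ⟨hpre, hsuf⟩
    have hpre' : ∀ x ∈ xs.take (k + 1), x ≤ xs[k] := by
      rw [htk]
      intro x hx
      rcases List.mem_append.mp hx with hx | hx
      · exact hpre x hx
      · simp at hx; omega
    exact ⟨⟨hpre' xs[0] h0mem, hpre'⟩, ⟨hsuf xs[xs.length - 1] hlmem, hsuf⟩⟩

-- B's scan equals A's first-match scan over the same index list
theorem bLoop_eq (xs : List Int) (hne : xs ≠ []) (l : List Int)
    (hl : ∀ i ∈ l, 0 ≤ i ∧ i < (xs.length : Int)) :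
    bLoop xs l = firstQ xs (pmaxes (PySem.List.pyGetD xs 0 0) xs)
      (minsDown (PySem.List.pyGetD xs ((xs.length : Int) - 1) 0) xs) l (-1) := by
  induction l with
  | nil => rfl
  | cons i r ih =>
      have hi := hl i (by simp)
      have hik : i = ((i.toNat : Nat) : Int) := (Int.toNat_of_nonneg hi.1).symm
      have hk : i.toNat < xs.length := by omega
      have hxk : PySem.List.pyGetD xs i 0 = xs[i.toNat] := by
        rw [PySem.List.pyGetD_eq_getElem xs 0 hi.1 hi.2]
      have hcond : ((PySem.List.slice xs none (some i)).all (fun x => decide (x ≤ PySem.List.pyGetD xs i 0))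
            && (PySem.List.slice xs (some i) none).all (fun x => decide (PySem.List.pyGetD xs i 0 ≤ x))) = true
          ↔ (PySem.List.pyGetD xs i 0
                ≥ PySem.List.pyGetD (pmaxes (PySem.List.pyGetD xs 0 0) xs) i 0
              ∧ PySem.List.pyGetD xs i 0
                ≤ PySem.List.pyGetD (minsDown (PySem.List.pyGetD xs ((xs.length : Int) - 1) 0) xs) i 0) := by
        rw [hik, cond_iff xs hne i.toNat hk]
        rw [← hik, PySem.List.slice_to xs hi.1, PySem.List.slice_from xs hi.1, hxk]
        simp [List.all_eq_true]
      simp only [bLoop, firstQ]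
      by_cases hq : PySem.List.pyGetD xs i 0
            ≥ PySem.List.pyGetD (pmaxes (PySem.List.pyGetD xs 0 0) xs) i 0
          ∧ PySem.List.pyGetD xs i 0
            ≤ PySem.List.pyGetD (minsDown (PySem.List.pyGetD xs ((xs.length : Int) - 1) 0) xs) i 0
      · rw [if_pos (hcond.mpr hq), if_pos hq]
      · rw [if_neg (fun hc => hq (hcond.mp hc)), if_neg hq]
        exact ih (fun j hj => hl j (by simp [hj]))

-- ===== VERDICT (by name: the statement is the Claim_ definition above) =====
theorem find_v_spec : Claim_equal_find_v := by
  intro xs _ hne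
  unfold Spec_find_v find_v_alt
  rw [find_v_eq xs, bLoop_eq xs hne _ (fun i hi => by
    have := PySem.List.mem_pyRange_one.mp hi
    exact ⟨by omega, by omega⟩)]
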